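-- pv_equiv track=rewrite | github.com/Avriox/PEARL | test-projects/textdistance-master/textdistance/algorithms/phonetic.py | _calc_mra
-- ===== SOURCE A (Python) =====
-- from itertools import groupby, zip_longest
--
-- def _calc_mra(word: str) -> str:
--     if not word:
--         return word
--     word = word.upper()
--     word = word[0] + ''.join(c for c in word[1:] if c not in 'AEIOU')
--     # remove repeats like an UNIX uniq
--     word = ''.join(char for char, _ in groupby(word))
--     if len(word) > 6:
--         return word[:3] + word[-3:]
--     return word
-- ===== SOURCE B (Python) =====
-- def _calc_mra(word: str) -> str:
--     if not word:
--         return word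
--     w = word.upper()
--     vowels = 'AEIOU'
--     # forward scan: count the code characters, remembering only the first six
--     n = 0
--     head = []
--     prev = None
--     first = True
--     for c in w:
--         if (first or c not in vowels) and c != prev:
--             n += 1
--             if n <= 6:
--                 head.append(c)
--             prev = c
--         first = False
--     if n <= 6:
--         return ''.join(head)
--     # long code: take first three, and recover the last three by a backward
--     # scan that stops as soon as three code characters are found
--     tail = []
--     prev = None
--     for c in reversed(w):
--         if c not in vowels and c != prev:
--             tail.append(c)
--             prev = c
--             if len(tail) == 3:
--                 break
--     return ''.join(head[:3]) + ''.join(reversed(tail))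
-- ===== Notes on version B (the rewrite author's own statement) =====
-- stated objective: alternative
-- what changed: Instead of materializing the full code (filter comprehension + groupby + two joins) and slicing it, B makes one counting forward scan that keeps only the first six code characters, and when the count exceeds six recovers the last three by a backward scan over the reversed word that stops as soon as three code characters are found, building the tail back-to-front.
import Mathlib
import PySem

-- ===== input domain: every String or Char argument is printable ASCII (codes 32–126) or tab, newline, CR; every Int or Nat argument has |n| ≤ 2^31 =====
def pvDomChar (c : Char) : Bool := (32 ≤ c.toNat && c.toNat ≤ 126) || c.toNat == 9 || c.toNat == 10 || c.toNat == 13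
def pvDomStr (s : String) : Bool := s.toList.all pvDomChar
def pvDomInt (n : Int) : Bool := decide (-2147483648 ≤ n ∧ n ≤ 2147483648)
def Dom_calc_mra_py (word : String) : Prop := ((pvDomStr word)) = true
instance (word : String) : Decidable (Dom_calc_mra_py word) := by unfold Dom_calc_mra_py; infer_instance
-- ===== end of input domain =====

-- B replaces filter + groupby + join + slicing by a counting forward scan keeping only the
-- first six code chars plus an early-stopping backward scan for the last three; same values.

-- ===== PORT A =====
-- ''.join(char for char, _ in groupby(word)) — keep the first char of each run
def pvDedupAux : Char → List Char → List Char
  | _, [] => []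
  | last, c :: t => if c = last then pvDedupAux last t else c :: pvDedupAux c t

def pvGroupbyFirsts : List Char → List Char
  | [] => []
  | a :: t => a :: pvDedupAux a t

def calc_mra_py (word : String) : String :=
  if word = "" then word
  else
    let u := (PySem.Str.upper word).toList
    let w1 := match u with
      | [] => []
      | c :: t => c :: t.filter (fun c => !("AEIOU".toList.contains c))
    let w2 := pvGroupbyFirsts w1
    if w2.length > 6 then
      String.ofList (PySem.List.slice w2 none (some 3) ++ PySem.List.slice w2 (some (-3)) none)
    else String.ofList w2

-- ===== PORT B =====
-- the forward loop of Source B: counts all code chars (n), keeps only the first six (head)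
def pvFwdGo (first : Bool) (prev : Option Char) (n : Nat) (head : List Char) :
    List Char → Nat × List Char
  | [] => (n, head)
  | c :: t =>
    if (first || !("AEIOU".toList.contains c)) && (some c != prev) then
      pvFwdGo false (some c) (n + 1) (if n + 1 ≤ 6 then head ++ [c] else head) t
    else
      pvFwdGo false prev n head t

-- the backward loop of Source B: collects code chars until three are found (fuel = 3 - len(tail))
def pvBwdGo : Nat → Option Char → List Char → List Char
  | _, _, [] => []
  | 0, _, _ :: _ => []
  | k + 1, prev, c :: t =>
    if !("AEIOU".toList.contains c) && (some c != prev) then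
      c :: pvBwdGo k (some c) t
    else
      pvBwdGo (k + 1) prev t

def calc_mra_py_alt (word : String) : String :=
  if word = "" then word
  else
    let w := (PySem.Str.upper word).toList
    let fw := pvFwdGo true none 0 [] w
    if fw.1 ≤ 6 then String.ofList fw.2
    else
      let tail := pvBwdGo 3 none w.reverse
      String.ofList (fw.2.take 3 ++ tail.reverse)

-- ===== PRECONDITION & SPEC =====
def Spec_calc_mra_py (word : String) (out : String) : Prop := out = calc_mra_py_alt word
instance (word : String) (out : String) : Decidable (Spec_calc_mra_py word out) := by unfold Spec_calc_mra_py; infer_instance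

-- ===== CLAIM (what is proved, stated in full; the proofs are below) =====
def Claim_equal_calc_mra_py : Prop := ∀ (word : String), Dom_calc_mra_py word → Spec_calc_mra_py word (calc_mra_py word)

-- ===== LEMMAS AND PROOFS =====

-- adjacent-duplicate removal with an optional previously kept char
def pvUniqF : Option Char → List Char → List Char
  | _, [] => []
  | prev, c :: t => if some c = prev then pvUniqF prev t else c :: pvUniqF (some c) t

theorem pvDedup_eq (t : List Char) : ∀ a : Char, pvDedupAux a t = pvUniqF (some a) t := by
  induction t with
  | nil => intro a; rfl
  | cons c t ih =>
    intro a
    simp only [pvDedupAux, pvUniqF, Option.some.injEq]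
    by_cases h : c = a
    · simp [h, ih]
    · simp [h, ih]

theorem pvFwd_spec (t : List Char) : ∀ (prev : Option Char) (n : Nat) (h : List Char),
    pvFwdGo false prev n h t =
      (n + (pvUniqF prev (t.filter (fun c => !("AEIOU".toList.contains c)))).length,
       h ++ (pvUniqF prev (t.filter (fun c => !("AEIOU".toList.contains c)))).take (6 - n)) := by
  induction t with
  | nil => intro prev n h; simp [pvFwdGo, pvUniqF]
  | cons c t ih =>
    intro prev n h
    by_cases hv : ("AEIOU".toList.contains c) = true
    · have hfil : List.filter (fun c => !("AEIOU".toList.contains c)) (c :: t)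
          = List.filter (fun c => !("AEIOU".toList.contains c)) t := by
        have hnv : (!("AEIOU".toList.contains c)) = false := by rw [hv]; rfl
        simp only [List.filter_cons, hnv]; simp
      have hnv : (!("AEIOU".toList.contains c)) = false := by rw [hv]; rfl
      rw [hfil]
      simp only [pvFwdGo, hnv, Bool.false_or, Bool.false_and, Bool.false_eq_true, if_false]
      exact ih prev n h
    · have hnv : (!("AEIOU".toList.contains c)) = true := by
        rw [Bool.eq_false_iff.mpr hv]; rfl
      have hfil : List.filter (fun c => !("AEIOU".toList.contains c)) (c :: t)
          = c :: List.filter (fun c => !("AEIOU".toList.contains c)) t := by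
        simp only [List.filter_cons, hnv]; simp
      rw [hfil]
      simp only [pvFwdGo, hnv, Bool.false_or, Bool.true_and]
      by_cases hp : some c = prev
      · simp [hp, pvUniqF, ih prev n h]
      · have hb : (some c != prev) = true := by simp [bne, hp]
        simp only [hb, if_true, ih, pvUniqF, if_neg hp, Prod.mk.injEq]
        refine ⟨by simp only [List.length_cons]; omega, ?_⟩
        by_cases h6 : n + 1 ≤ 6
        · have h1 : 6 - n = (6 - (n + 1)) + 1 := by omega
          simp [h6, h1, List.take_succ_cons]
        · have h0 : 6 - n = 0 := by omega
          have h0' : 6 - (n + 1) = 0 := by omega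
          simp [h6, h0, h0']

theorem pvBwd_spec (t : List Char) : ∀ (k : Nat) (prev : Option Char),
    pvBwdGo k prev t =
      (pvUniqF prev (t.filter (fun c => !("AEIOU".toList.contains c)))).take k := by
  induction t with
  | nil => intro k prev; simp [pvBwdGo, pvUniqF]
  | cons c t ih =>
    intro k prev
    match k with
    | 0 => simp [pvBwdGo]
    | k + 1 =>
      by_cases hv : ("AEIOU".toList.contains c) = true
      · have hfil : List.filter (fun c => !("AEIOU".toList.contains c)) (c :: t)
            = List.filter (fun c => !("AEIOU".toList.contains c)) t := by
          have hnv : (!("AEIOU".toList.contains c)) = false := by rw [hv]; rfl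
          simp only [List.filter_cons, hnv]; simp
        have hnv : (!("AEIOU".toList.contains c)) = false := by rw [hv]; rfl
        rw [hfil]
        simp only [pvBwdGo, hnv, Bool.false_and, Bool.false_eq_true, if_false]
        exact ih (k + 1) prev
      · have hnv : (!("AEIOU".toList.contains c)) = true := by
          rw [Bool.eq_false_iff.mpr hv]; rfl
        have hfil : List.filter (fun c => !("AEIOU".toList.contains c)) (c :: t)
            = c :: List.filter (fun c => !("AEIOU".toList.contains c)) t := by
          simp only [List.filter_cons, hnv]; simp
        rw [hfil]
        simp only [pvBwdGo, hnv, Bool.true_and]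
        by_cases hp : some c = prev
        · simp [hp, pvUniqF, ih (k + 1) prev]
        · have hb : (some c != prev) = true := by simp [bne, hp]
          simp only [hb, if_true, pvUniqF, if_neg hp, List.take_succ_cons, ih k (some c)]

theorem pvUniqF_append_last (m : List Char) : ∀ (prev : Option Char) (a : Char),
    pvUniqF prev (m ++ [a]) =
      pvUniqF prev m ++ (if some a = (m.getLast?).or prev then [] else [a]) := by
  induction m with
  | nil => intro prev a; simp [pvUniqF]
  | cons c t ih =>
    intro prev a
    simp only [List.cons_append, pvUniqF]
    by_cases hp : some c = prev
    · rw [if_pos hp, if_pos hp, ih prev a]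
      have : (c :: t).getLast?.or prev = t.getLast?.or prev := by
        cases t with
        | nil => simp [hp]
        | cons d s => rw [List.getLast?_cons_cons]
      rw [this]
    · rw [if_neg hp, if_neg hp, ih (some c) a]
      have : (c :: t).getLast?.or prev = t.getLast?.or (some c) := by
        cases t with
        | nil => simp
        | cons d s =>
          rw [List.getLast?_cons_cons]
          cases hl : (d :: s).getLast? with
          | none => simp at hl
          | some x => simp
      rw [this, List.cons_append]

theorem pvUniqF_reverse (m : List Char) :
    pvUniqF none m.reverse = (pvUniqF none m).reverse := by
  induction m with
  | nil => rfl
  | cons c t ih =>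
    simp only [List.reverse_cons]
    rw [pvUniqF_append_last t.reverse none c, ih]
    have hlast : (t.reverse.getLast?).or none = t.head? := by
      simp [List.getLast?_reverse]
    rw [hlast]
    cases t with
    | nil => simp [pvUniqF]
    | cons d s =>
      by_cases hd : d = c
      · subst hd
        simp [pvUniqF]
      · have h1 : ¬ (some c = (d :: s).head?) := by
          simp only [List.head?_cons, Option.some.injEq]
          exact fun he => hd he.symm
        rw [if_neg h1]
        simp [pvUniqF, hd]

theorem pvUniqF_head_ne (l : List Char) (c : Char) (h : l.head? ≠ some c) :
    pvUniqF (some c) l = pvUniqF none l := by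
  cases l with
  | nil => rfl
  | cons d s =>
    have hd : ¬ (some d = some c) := by
      intro he; apply h; rw [List.head?_cons, he]
    simp only [pvUniqF, if_neg hd, if_neg (by simp : ¬ (some d = none))]

-- helper: take of a reverse, reversed back, is a suffix
theorem pvRevTake {α : Type} (l : List α) (n : Nat) :
    (l.reverse.take n).reverse = l.drop (l.length - n) := by
  rw [List.take_reverse, List.reverse_reverse]

-- ===== VERDICT (by name: the statement is the Claim_ definition above) =====
theorem calc_mra_py_spec : Claim_equal_calc_mra_py := by
  intro word _
  unfold Spec_calc_mra_py calc_mra_py calc_mra_py_alt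
  by_cases hw : word = ""
  · simp [hw]
  · rw [if_neg hw, if_neg hw]
    cases hu : (PySem.Str.upper word).toList with
    | nil => simp [pvGroupbyFirsts, pvFwdGo]
    | cons c t =>
      have hA : pvGroupbyFirsts (c :: t.filter (fun c => !("AEIOU".toList.contains c)))
          = c :: pvUniqF (some c) (t.filter (fun c => !("AEIOU".toList.contains c))) := by
        simp [pvGroupbyFirsts, pvDedup_eq]
      have hF : pvFwdGo true none 0 [] (c :: t)
          = (1 + (pvUniqF (some c) (t.filter (fun c => !("AEIOU".toList.contains c)))).length,
             [c] ++ (pvUniqF (some c) (t.filter (fun c => !("AEIOU".toList.contains c)))).take 5) := by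
        have : pvFwdGo true none 0 [] (c :: t) = pvFwdGo false (some c) 1 [c] t := by
          simp [pvFwdGo]
        rw [this, pvFwd_spec]
      simp only [hA, hF]
      set g := pvUniqF (some c) (t.filter (fun c => !("AEIOU".toList.contains c))) with hg
      by_cases h6 : (c :: g).length > 6
      · rw [if_pos h6, if_neg (by simp at h6 ⊢; omega)]
        have hlen : 6 ≤ g.length := by simp at h6; omega
        have hhead : ([c] ++ g.take 5).take 3 = (c :: g).take 3 := by
          have : [c] ++ g.take 5 = (c :: g).take 6 := by
            rw [List.take_succ_cons]; rfl
          rw [this, List.take_take]; norm_num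
        have hslices : PySem.List.slice (c :: g) none (some 3) = (c :: g).take 3 := by
          rw [PySem.List.slice_to (c :: g) (by norm_num : (0:Int) ≤ 3)]; rfl
        have hslicef : PySem.List.slice (c :: g) (some (-3)) none
            = (c :: g).drop ((c :: g).length - 3) := by
          rw [PySem.List.slice_from_neg_ofNat (c :: g) 3 (by omega)]
        have htail : pvBwdGo 3 none ((c :: t).reverse)
            = ((pvUniqF none ((c :: t).filter (fun c => !("AEIOU".toList.contains c)))).reverse).take 3 := by
          rw [pvBwd_spec, List.filter_reverse, pvUniqF_reverse]
        rw [hslices, hslicef, hhead, htail]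
        by_cases hv : ("AEIOU".toList.contains c) = true
        · -- first char is a vowel: it is its own first run, not part of the rest
          have hfil : (c :: t).filter (fun c => !("AEIOU".toList.contains c))
              = t.filter (fun c => !("AEIOU".toList.contains c)) := by
            have hnv : (!("AEIOU".toList.contains c)) = false := by rw [hv]; rfl
            simp only [List.filter_cons, hnv]; simp
          have hne : (t.filter (fun c => !("AEIOU".toList.contains c))).head? ≠ some c := by
            intro he
            have hcmem : c ∈ t.filter (fun c => !("AEIOU".toList.contains c)) :=
              List.mem_of_mem_head? (by rw [he]; rfl)
            have := (List.mem_filter.mp hcmem).2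
            rw [hv] at this; simp at this
          have hgu : pvUniqF none ((c :: t).filter (fun c => !("AEIOU".toList.contains c))) = g := by
            rw [hfil, hg, pvUniqF_head_ne _ _ hne]
          rw [hgu, pvRevTake]
          have hdrop : (c :: g).drop ((c :: g).length - 3) = g.drop (g.length - 3) := by
            have : (c :: g).length - 3 = (g.length - 3) + 1 := by
              simp only [List.length_cons]; omega
            rw [this, List.drop_succ_cons]
          rw [hdrop]
        · -- first char is not a vowel: the run lists coincide
          have hfil : (c :: t).filter (fun c => !("AEIOU".toList.contains c))
              = c :: t.filter (fun c => !("AEIOU".toList.contains c)) := by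
            have hnv : (!("AEIOU".toList.contains c)) = true := by
              rw [Bool.eq_false_iff.mpr hv]; rfl
            simp only [List.filter_cons, hnv]; simp
          have hgu : pvUniqF none ((c :: t).filter (fun c => !("AEIOU".toList.contains c)))
              = c :: g := by
            rw [hfil]
            simp [pvUniqF, hg]
          rw [hgu, pvRevTake]
      · rw [if_neg h6, if_pos (by simp at h6 ⊢; omega)]
        have hlen : g.length ≤ 5 := by simp at h6; omega
        rw [List.take_of_length_le hlen]
        rfl
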